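-- pv_equiv track=rewrite | github.com/bitscopic/BIAS-2015 | src/bias_2015/variant_interpretation_dataset_loader.py | calculate_3prime_region
-- ===== SOURCE A (Python) =====
-- def calculate_3prime_region(chrom, strand, exon_starts, exon_ends, exon_frames):
--     """
--     Identify the final coding exon, then identify the last 50 bases. Return the
--     region which spans these 50 bases as a tuple (chrom, start, stop).
--     """
--     # Only consider exons that are considered in-frame (exclude out of frame exons)
--     coding_exon_starts = []
--     coding_exon_ends = []
--     exon_count = len(exon_starts)
--     for x in range(0, exon_count):
--         if exon_frames[x] == '-1':
--             continue
--         coding_exon_starts.append(exon_starts[x])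
--         coding_exon_ends.append(exon_ends[x])
--
--     if not coding_exon_ends: return ()
--     # For the positive strand, use the last exon
--     if strand == "+":
--         last_exon_end = coding_exon_ends[-1]
--         start_3prime = last_exon_end - 50
--         end_3prime = last_exon_end
--     else: # For the negative strand, use the first exon
--         first_exon_start = coding_exon_starts[0]
--         end_3prime = first_exon_start + 50
--         start_3prime = first_exon_start
--
--     return chrom, start_3prime, end_3prime
-- ===== SOURCE B (Python) =====
-- def calculate_3prime_region(chrom, strand, exon_starts, exon_ends, exon_frames):
--     """Strand-directed single scan over the zipped exons, tracking one boundary."""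
--     if strand == "+":
--         boundary = None
--         for _start, end, frame in zip(exon_starts, exon_ends, exon_frames):
--             if frame != '-1':
--                 boundary = end
--         if boundary is None:
--             return ()
--         return chrom, boundary - 50, boundary
--     for start, _end, frame in zip(exon_starts, exon_ends, exon_frames):
--         if frame != '-1':
--             return chrom, start, start + 50
--     return ()
-- ===== Notes on version B (the rewrite author's own statement) =====
-- stated objective: simpler
-- what changed: B branches on strand first and does one directed scan over the zipped exons keeping a single boundary (last in-frame exon end for '+', first in-frame exon start with an early return for '-'), instead of A's building of two coding-exon lists and indexing them afterwards; no intermediate lists are allocated.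
-- outside the precondition, e.g. on calculate_3prime_region('chr1', '+', [1], [5], ['-1']): A returns (), B returns ()
import Mathlib
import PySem

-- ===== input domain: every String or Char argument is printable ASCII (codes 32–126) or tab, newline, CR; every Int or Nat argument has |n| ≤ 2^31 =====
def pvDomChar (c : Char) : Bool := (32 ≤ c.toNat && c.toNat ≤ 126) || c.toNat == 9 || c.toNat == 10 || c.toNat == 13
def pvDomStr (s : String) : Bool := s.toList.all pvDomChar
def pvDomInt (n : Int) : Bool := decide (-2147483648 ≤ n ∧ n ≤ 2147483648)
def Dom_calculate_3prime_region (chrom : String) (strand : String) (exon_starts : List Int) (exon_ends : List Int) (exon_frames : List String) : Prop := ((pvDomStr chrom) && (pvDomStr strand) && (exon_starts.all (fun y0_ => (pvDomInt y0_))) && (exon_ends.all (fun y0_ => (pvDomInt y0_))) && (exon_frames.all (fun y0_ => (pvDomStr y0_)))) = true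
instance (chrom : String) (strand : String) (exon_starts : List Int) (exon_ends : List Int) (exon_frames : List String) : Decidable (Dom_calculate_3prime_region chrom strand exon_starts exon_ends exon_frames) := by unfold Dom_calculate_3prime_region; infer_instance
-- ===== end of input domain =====

-- B replaces A's two collected coding-exon lists (indexed afterwards) by one strand-directed scan
-- keeping a single boundary; objective: simpler. Equal return value on all of Pre_.

-- ===== PORT A =====
def calculate_3prime_region (chrom : String) (strand : String) (exon_starts : List Int) (exon_ends : List Int) (exon_frames : List String) : String × Int × Int :=
  let exon_count : Int := exon_starts.length
  let coding := (PySem.List.pyRange 0 exon_count 1).foldl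
    (fun (acc : List Int × List Int) x =>
      if PySem.List.pyGetD exon_frames x "" == "-1" then acc
      else (acc.1 ++ [PySem.List.pyGetD exon_starts x 0], acc.2 ++ [PySem.List.pyGetD exon_ends x 0]))
    ([], [])
  if coding.2 = [] then (chrom, 0, 0)  -- Python returns the untyped empty tuple () here; outside Pre_
  else if strand == "+" then
    let last_exon_end := PySem.List.pyGetD coding.2 (-1) 0
    (chrom, last_exon_end - 50, last_exon_end)
  else
    let first_exon_start := PySem.List.pyGetD coding.1 0 0
    (chrom, first_exon_start, first_exon_start + 50)

-- ===== PORT B =====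
def pvFirstInFrameStart : List (Int × Int × String) → Option Int
  | [] => none
  | (s, _, f) :: rest => if f != "-1" then some s else pvFirstInFrameStart rest

def calculate_3prime_region_alt (chrom : String) (strand : String) (exon_starts : List Int) (exon_ends : List Int) (exon_frames : List String) : String × Int × Int :=
  if strand == "+" then
    let boundary := (exon_starts.zip (exon_ends.zip exon_frames)).foldl
      (fun (acc : Option Int) t => if t.2.2 != "-1" then some t.2.1 else acc) none
    match boundary with
    | none => (chrom, 0, 0)  -- Python returns the untyped empty tuple () here; outside Pre_
    | some b => (chrom, b - 50, b)
  else
    match pvFirstInFrameStart (exon_starts.zip (exon_ends.zip exon_frames)) with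
    | none => (chrom, 0, 0)  -- Python returns the untyped empty tuple () here; outside Pre_
    | some s => (chrom, s, s + 50)

-- ===== PRECONDITION & SPEC =====
-- Pre_ excludes exactly (a) the inputs where A raises IndexError (exon_frames shorter than
-- exon_starts, or an in-frame index beyond exon_ends), and (b) the inputs with no in-frame exon,
-- where A returns the empty tuple (), which is not a value of the declared (String, Int, Int) type.
def Pre_calculate_3prime_region (chrom : String) (strand : String) (exon_starts : List Int) (exon_ends : List Int) (exon_frames : List String) : Prop :=
  exon_starts.length ≤ exon_frames.length ∧
  (∀ i : Nat, i < exon_starts.length → exon_frames.getD i "" ≠ "-1" → i < exon_ends.length) ∧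
  (∃ i : Nat, i < exon_starts.length ∧ exon_frames.getD i "" ≠ "-1")
instance (chrom : String) (strand : String) (exon_starts : List Int) (exon_ends : List Int) (exon_frames : List String) : Decidable (Pre_calculate_3prime_region chrom strand exon_starts exon_ends exon_frames) := by unfold Pre_calculate_3prime_region; infer_instance

def pvWitness_calculate_3prime_region : String × String × List Int × List Int × List String := ("chr1", "+", [100], [260], ["0"])

def Spec_calculate_3prime_region (chrom : String) (strand : String) (exon_starts : List Int) (exon_ends : List Int) (exon_frames : List String) (out : String × Int × Int) : Prop := out = calculate_3prime_region_alt chrom strand exon_starts exon_ends exon_frames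
instance (chrom : String) (strand : String) (exon_starts : List Int) (exon_ends : List Int) (exon_frames : List String) (out : String × Int × Int) : Decidable (Spec_calculate_3prime_region chrom strand exon_starts exon_ends exon_frames out) := by unfold Spec_calculate_3prime_region; infer_instance

-- ===== CLAIM (what is proved, stated in full; the proofs are below) =====
def Claim_equal_calculate_3prime_region : Prop := ∀ (chrom : String) (strand : String) (exon_starts : List Int) (exon_ends : List Int) (exon_frames : List String), Dom_calculate_3prime_region chrom strand exon_starts exon_ends exon_frames → Pre_calculate_3prime_region chrom strand exon_starts exon_ends exon_frames → Spec_calculate_3prime_region chrom strand exon_starts exon_ends exon_frames (calculate_3prime_region chrom strand exon_starts exon_ends exon_frames)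

-- ===== LEMMAS AND PROOFS =====

-- A's loop: the pair of collected lists is a filter-map over the index range.
theorem pv_pair_foldl (P : Nat → Bool) (s e : Nat → Int) (l : List Nat) (c1 c2 : List Int) :
    l.foldl (fun (acc : List Int × List Int) k =>
        if P k then acc else (acc.1 ++ [s k], acc.2 ++ [e k])) (c1, c2)
      = (c1 ++ (l.filter (fun k => !P k)).map s, c2 ++ (l.filter (fun k => !P k)).map e) := by
  induction l generalizing c1 c2 with
  | nil => simp
  | cons k l ih =>
    by_cases h : P k = true <;> simp [h, ih]

-- B's '+' loop: last-written value of a guarded fold.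
theorem pv_last_foldl {α β : Type} (g : α → Bool) (f : α → β) (l : List α) (a0 : Option β) :
    l.foldl (fun (acc : Option β) t => if g t then some (f t) else acc) a0
      = (((l.filter g).map f).getLast?).or a0 := by
  induction l generalizing a0 with
  | nil => simp
  | cons t l ih =>
    by_cases h : g t = true
    · simp only [List.foldl_cons, h, ih, List.filter_cons_of_pos h, List.map_cons]
      cases hl : ((l.filter g).map f).getLast? with
      | none => simp [List.getLast?_cons, hl]
      | some y => simp [List.getLast?_cons, hl]
    · simp [h, ih, List.filter_cons_of_neg]

-- B's '-' loop: first matching element.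
theorem pv_first_eq (l : List (Int × Int × String)) :
    pvFirstInFrameStart l = ((l.filter (fun t => t.2.2 != "-1")).map (·.1)).head? := by
  induction l with
  | nil => simp [pvFirstInFrameStart]
  | cons t l ih =>
    obtain ⟨s, e, f⟩ := t
    cases h : (f != "-1") with
    | true => simp [pvFirstInFrameStart, h]
    | false => simp [pvFirstInFrameStart, h, ih]

-- The zip of the three lists, as a map over the index range.
theorem pv_zip_eq_map_range (starts ends : List Int) (frames : List String) :
    starts.zip (ends.zip frames)
      = (List.range (min starts.length (min ends.length frames.length))).map
          (fun k => (starts.getD k 0, ends.getD k 0, frames.getD k "")) := by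
  apply List.ext_getElem
  · simp
  · intro k h1 h2
    simp only [List.length_zip] at h1
    simp [List.getElem_zip, List.getD_eq_getElem?_getD,
      Nat.lt_min.mp h1, (Nat.lt_min.mp (Nat.lt_min.mp h1).2)]

-- Indices past every in-frame exon contribute nothing: the filtered index range truncates.
theorem pv_filter_range_trunc (q : Nat → Bool) (m n : Nat) (hmn : m ≤ n)
    (h : ∀ k, m ≤ k → k < n → q k = false) :
    (List.range n).filter q = (List.range m).filter q := by
  obtain ⟨d, rfl⟩ := Nat.exists_eq_add_of_le hmn
  rw [List.range_add, List.filter_append]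
  have hnil : (List.filter q (List.map (fun x => m + x) (List.range d))) = [] := by
    rw [List.filter_eq_nil_iff]
    intro a ha
    simp only [List.mem_map, List.mem_range] at ha
    obtain ⟨x, hx, rfl⟩ := ha
    simp [h (m + x) (by omega) (by omega)]
  simp [hnil]

theorem calculate_3prime_region_spec : Claim_equal_calculate_3prime_region := by
  intro chrom strand starts ends frames _ hpre
  obtain ⟨h1, h2, i, hi, hqi⟩ := hpre
  unfold Spec_calculate_3prime_region calculate_3prime_region calculate_3prime_region_alt
  set n := starts.length with hn
  set m := min n (min ends.length frames.length) with hm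
  have htrunc : (List.range n).filter (fun k => !(frames.getD k "" == "-1"))
      = (List.range m).filter (fun k => !(frames.getD k "" == "-1")) := by
    apply pv_filter_range_trunc _ m n (by omega)
    intro k hk1 hk2
    by_cases hqk : frames.getD k "" = "-1"
    · simp only [hqk, beq_self_eq_true, Bool.not_true]
    · exfalso
      have := h2 k hk2 hqk
      omega
  have hfold :
      (PySem.List.pyRange 0 (n : Int) 1).foldl
        (fun (acc : List Int × List Int) x =>
          if PySem.List.pyGetD frames x "" == "-1" then acc
          else (acc.1 ++ [PySem.List.pyGetD starts x 0], acc.2 ++ [PySem.List.pyGetD ends x 0]))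
        ([], [])
      = (((List.range m).filter (fun k => !(frames.getD k "" == "-1"))).map (fun k => starts.getD k 0),
         ((List.range m).filter (fun k => !(frames.getD k "" == "-1"))).map (fun k => ends.getD k 0)) := by
    have e1 := pv_pair_foldl (fun k => frames.getD k "" == "-1")
      (fun k => starts.getD k 0) (fun k => ends.getD k 0) (List.range n) [] []
    simp only [List.nil_append] at e1
    rw [PySem.List.pyRange_zero_nat, List.foldl_map]
    simp only [PySem.List.pyGetD_natCast]
    rw [e1, htrunc]
  have him : i < m := by
    have h3 := h2 i hi hqi
    omega
  have hmem : i ∈ (List.range m).filter (fun k => !(frames.getD k "" == "-1")) := by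
    simp only [List.mem_filter, List.mem_range]
    exact ⟨him, by simpa using hqi⟩
  have hnil : (List.range m).filter (fun k => !(frames.getD k "" == "-1")) ≠ [] :=
    List.ne_nil_of_mem hmem
  have hzip : starts.zip (ends.zip frames)
      = (List.range m).map (fun k => (starts.getD k 0, ends.getD k 0, frames.getD k "")) :=
    pv_zip_eq_map_range starts ends frames
  have hcomp : ((fun (t : Int × Int × String) => t.2.2 != "-1") ∘
      (fun k => (starts.getD k 0, ends.getD k 0, frames.getD k "")))
      = (fun k => !(frames.getD k "" == "-1")) := rfl
  by_cases hs : (strand == "+") = true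
  · -- positive strand
    have hb : (starts.zip (ends.zip frames)).foldl
        (fun (acc : Option Int) t => if t.2.2 != "-1" then some t.2.1 else acc) none
        = some ((((List.range m).filter (fun k => !(frames.getD k "" == "-1"))).map
            (fun k => ends.getD k 0)).getLast (by simpa using hnil)) := by
      rw [hzip, pv_last_foldl, List.filter_map, hcomp, List.map_map]
      rw [List.getLast?_eq_some_getLast (by simpa using hnil)]
      rfl
    simp only [hfold, hs, if_true, hb]
    rw [if_neg (by simpa using hnil)]
    rw [PySem.List.pyGetD_neg_one _ _ (by simpa using hnil)]
  · -- negative strand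
    have hbs : pvFirstInFrameStart (starts.zip (ends.zip frames))
        = (((List.range m).filter (fun k => !(frames.getD k "" == "-1"))).map
            (fun k => starts.getD k 0)).head? := by
      rw [hzip, pv_first_eq, List.filter_map, hcomp, List.map_map]
      rfl
    obtain ⟨x, rest, hxr⟩ := List.exists_cons_of_ne_nil hnil
    simp only [hfold, hs, hbs, hxr]
    rw [if_neg (by simp)]
    simp
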